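-- pv_equiv track=rewrite | github.com/devbok0101/Daily-Log-Algorithm | level0/Emergency.py | create_priority_dic
-- ===== SOURCE A (Python) =====
-- from collections import defaultdict
--
-- def create_priority_dic(emergency):
--     reverse_list = emergency[:]
--     reverse_list.sort(reverse=True)
--     dic = defaultdict()
--     priority = 1
--     for num in reverse_list:
--         dic[num] = priority
--         priority += 1
--     return dic
-- ===== SOURCE B (Python) =====
-- from collections import defaultdict
--
-- def create_priority_dic(emergency):
--     # Rank by counting: priority of v = number of elements >= v; iterate distinct
--     # values in descending order to reproduce the dict's insertion order.
--     dic = defaultdict()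
--     for v in sorted(set(emergency), reverse=True):
--         dic[v] = sum(1 for x in emergency if x >= v)
--     return dic
-- ===== Notes on version B (the rewrite author's own statement) =====
-- stated objective: alternative
-- what changed: Instead of sorting the whole list and writing an incrementing counter into the dict (last write wins), B iterates the distinct values in descending order once and computes each priority directly as the count of elements >= v.
import Mathlib
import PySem

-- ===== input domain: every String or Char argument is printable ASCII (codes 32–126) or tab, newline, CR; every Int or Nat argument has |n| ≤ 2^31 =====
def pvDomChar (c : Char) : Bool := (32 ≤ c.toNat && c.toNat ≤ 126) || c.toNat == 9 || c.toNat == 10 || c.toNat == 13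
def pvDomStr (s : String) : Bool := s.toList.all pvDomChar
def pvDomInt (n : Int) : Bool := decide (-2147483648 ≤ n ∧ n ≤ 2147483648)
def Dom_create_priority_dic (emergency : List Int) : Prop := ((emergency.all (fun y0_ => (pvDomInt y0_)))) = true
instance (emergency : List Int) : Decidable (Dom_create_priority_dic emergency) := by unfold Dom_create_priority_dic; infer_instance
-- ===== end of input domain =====

-- B replaces 'sort everything, write an incrementing counter into the dict' by a single pass
-- over the distinct values in descending order, computing each priority directly as the count
-- of elements >= v (an alternative decomposition; the return value is identical).

-- ===== PORT A =====
-- reverse_list = sorted copy (reverse=True); then for num in reverse_list: dic[num] = priority; priority += 1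
def create_priority_dic (emergency : List Int) : List (Int × Int) :=
  let reverse_list := PySem.List.sorted emergency (fun x => x) true
  (reverse_list.foldl
      (fun (st : PySem.Dict Int Int × Int) num => (st.1.insert num st.2, st.2 + 1))
      ((PySem.Dict.empty : PySem.Dict Int Int), 1)).1.items

-- ===== PORT B =====
-- for v in sorted(set(emergency), reverse=True): dic[v] = sum(1 for x in emergency if x >= v)
def create_priority_dic_alt (emergency : List Int) : List (Int × Int) :=
  let vals := PySem.List.sorted (PySem.Set.ofList emergency) (fun x => x) true
  (vals.foldl
      (fun (d : PySem.Dict Int Int) v =>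
        d.insert v ((emergency.map (fun x => if v ≤ x then (1 : Int) else 0)).sum))
      (PySem.Dict.empty : PySem.Dict Int Int)).items

-- ===== PRECONDITION & SPEC =====
def Spec_create_priority_dic (emergency : List Int) (out : List (Int × Int)) : Prop := out = create_priority_dic_alt emergency
instance (emergency : List Int) (out : List (Int × Int)) : Decidable (Spec_create_priority_dic emergency out) := by unfold Spec_create_priority_dic; infer_instance

-- ===== CLAIM (what is proved, stated in full; the proofs are below) =====
def Claim_equal_create_priority_dic : Prop := ∀ (emergency : List Int), Dom_create_priority_dic emergency → Spec_create_priority_dic emergency (create_priority_dic emergency)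

-- ===== LEMMAS AND PROOFS =====

-- Set.ofList l is a sublist of l (first occurrences kept in order).
lemma ofList_sublist (l : List Int) : (PySem.Set.ofList l).Sublist l := by
  induction l using List.reverseRecOn with
  | nil => simp [PySem.Set.ofList_nil]
  | append_singleton xs x ih =>
      rw [PySem.Set.ofList_append_singleton, PySem.Set.add_eq_ite]
      split
      · exact ih.trans (List.sublist_append_left xs [x])
      · exact ih.append (List.Sublist.refl [x])

-- dedup of a descending-sorted list = descending sort of the dedup
lemma ofList_sorted_comm (e : List Int) :
    PySem.Set.ofList (PySem.List.sorted e (fun x => x) true)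
      = PySem.List.sorted (PySem.Set.ofList e) (fun x => x) true := by
  refine (PySem.List.sorted_rev_eq_of_perm_of_pairwise_gt _ _ _ ?_ ?_).symm
  · refine (List.perm_ext_iff_of_nodup (PySem.Set.nodup_ofList _) (PySem.Set.nodup_ofList _)).2 ?_
    intro x
    simp [PySem.Set.mem_ofList, PySem.List.mem_sorted]
  · have hle : (PySem.Set.ofList (PySem.List.sorted e (fun x => x) true)).Pairwise
        (fun a b => b ≤ a) :=
      (PySem.List.sorted_pairwise_rev e (fun x => x)).sublist (ofList_sublist _)
    have hnd := PySem.Set.nodup_ofList (PySem.List.sorted e (fun x => x) true)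
    exact (hle.and hnd).imp (fun {a b} hh => lt_of_le_of_ne hh.1 (Ne.symm hh.2))

-- the second component of A's fold is the running priority
lemma A_fold_snd (l : List Int) (d : PySem.Dict Int Int) (p : Int) :
    (l.foldl (fun (st : PySem.Dict Int Int × Int) num => (st.1.insert num st.2, st.2 + 1)) (d, p)).2
      = p + l.length := by
  induction l generalizing d p with
  | nil => simp
  | cons x xs ih => simp [List.foldl_cons, ih]; omega

-- characterisation of A's loop on a descending-sorted list: each key's final
-- (last-written) priority is the number of elements ≥ it, keys in first-occurrence order
lemma A_fold_items (l : List Int) (h : l.Pairwise (fun a b => b ≤ a)) :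
    (l.foldl (fun (st : PySem.Dict Int Int × Int) num => (st.1.insert num st.2, st.2 + 1))
        ((PySem.Dict.empty : PySem.Dict Int Int), 1)).1.items
      = (PySem.Set.ofList l).map (fun v => (v, ((l.countP (fun x => decide (v ≤ x)) : Nat) : Int))) := by
  induction l using List.reverseRecOn with
  | nil => simp [PySem.Set.ofList_nil, PySem.Dict.empty]
  | append_singleton xs x ih =>
      rw [List.pairwise_append] at h
      obtain ⟨h1, -, h3⟩ := h
      have hx : ∀ a ∈ xs, x ≤ a := fun a ha => h3 a ha x (by simp)
      have ihx := ih h1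
      rw [List.foldl_append]
      simp only [List.foldl_cons, List.foldl_nil]
      have hsnd := A_fold_snd xs (PySem.Dict.empty : PySem.Dict Int Int) 1
      set st := xs.foldl
          (fun (st : PySem.Dict Int Int × Int) num => (st.1.insert num st.2, st.2 + 1))
          ((PySem.Dict.empty : PySem.Dict Int Int), 1) with hst
      have hkeys : st.1.keys = PySem.Set.ofList xs := by
        simp [PySem.Dict.keys, ihx, Function.comp_def]
      have hcont : st.1.contains x = decide (x ∈ xs) := by
        rw [PySem.Dict.contains_eq_decide_mem_keys, hkeys]
        simp [PySem.Set.mem_ofList]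
      have hcount_all : xs.countP (fun a => decide (x ≤ a)) = xs.length :=
        List.countP_eq_length.2 (fun a ha => by simpa using hx a ha)
      by_cases hmem : x ∈ xs
      · have hc : st.1.contains x = true := by simp [hcont, hmem]
        rw [PySem.Dict.items_insert, hc]
        simp only [if_true]
        rw [ihx, List.map_map,
          PySem.Set.ofList_append_singleton,
          PySem.Set.add_of_mem (by simpa [PySem.Set.mem_ofList] using hmem)]
        refine List.map_congr_left ?_
        intro v hv
        have hvmem : v ∈ xs := (PySem.Set.mem_ofList _ _).1 hv
        have hvx : x ≤ v := hx v hvmem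
        by_cases hveq : v = x
        · subst hveq
          simp [List.countP_append, hcount_all, hsnd]
          omega
        · have hnot : ¬ (v ≤ x) := fun hle => hveq (le_antisymm hle hvx)
          simp [Function.comp, hveq, List.countP_append, hnot]
      · have hc : st.1.contains x = false := by simp [hcont, hmem]
        rw [PySem.Dict.items_insert, hc]
        simp only [Bool.false_eq_true, if_false]
        rw [ihx, PySem.Set.ofList_append_singleton,
          PySem.Set.add_of_not_mem (by simpa [PySem.Set.mem_ofList] using hmem),
          List.map_append]
        congr 1
        · refine List.map_congr_left ?_
          intro v hv
          have hvmem : v ∈ xs := (PySem.Set.mem_ofList _ _).1 hv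
          have hvx : x ≤ v := hx v hvmem
          have hveq : v ≠ x := fun hh => hmem (hh ▸ hvmem)
          have hnot : ¬ (v ≤ x) := fun hle => hveq (le_antisymm hle hvx)
          simp [List.countP_append, hnot]
        · simp [List.countP_append, hcount_all, hsnd]
          omega

theorem create_priority_dic_spec : Claim_equal_create_priority_dic := by
  intro e _
  unfold Spec_create_priority_dic create_priority_dic create_priority_dic_alt
  rw [A_fold_items _ (PySem.List.sorted_pairwise_rev e (fun x => x))]
  have hnodup : (PySem.List.sorted (PySem.Set.ofList e) (fun x => x) true).Nodup :=
    (PySem.List.sorted_perm (PySem.Set.ofList e) (fun x => x) true).symm.nodup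
      (PySem.Set.nodup_ofList e)
  have hB := PySem.Dict.items_foldl_insert_fresh
      (PySem.List.sorted (PySem.Set.ofList e) (fun x => x) true) (fun v => v)
      (fun v => (e.map (fun x => if v ≤ x then (1 : Int) else 0)).sum)
      (PySem.Dict.empty : PySem.Dict Int Int)
      (by intro a _; simp [PySem.Dict.contains_empty])
      (by simpa using hnodup)
  rw [hB, ofList_sorted_comm]
  simp only [PySem.Dict.empty, List.nil_append]
  refine List.map_congr_left ?_
  intro v hv
  have hsum : (e.map (fun x => if v ≤ x then (1 : Int) else 0)).sum
      = ((e.countP (fun x => decide (v ≤ x)) : Nat) : Int) := by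
    rw [← PySem.List.sum_map_ite_one_zero (fun x => decide (v ≤ x)) e]
    simp
  have hcp : (PySem.List.sorted e (fun x => x) true).countP (fun x => decide (v ≤ x))
      = e.countP (fun x => decide (v ≤ x)) :=
    (PySem.List.sorted_perm e (fun x => x) true).countP_eq _
  simp [hcp, hsum]
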